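-- pv_equiv track=rewrite | github.com/greisane/gret | helpers.py | remove_subsequence
-- ===== SOURCE A (Python) =====
-- def remove_subsequence(seq, subseq, /):
--     """Removes the first instance of a subsequence from another sequence."""
--
--     for i in range(0, len(seq) - len(subseq) + 1):
--         j = -1
--         for j, el in enumerate(subseq):
--             if seq[i+j] != el:
--                 j = -1
--                 break
--         if j == len(subseq) - 1:
--             del seq[i:i+len(subseq)]
--             break
--     return seq
-- ===== SOURCE B (Python) =====
-- def remove_subsequence(seq, subseq, /):
--     """Removes the first instance of a subsequence from another sequence."""
--     m = len(subseq)
--     states = []  # lengths j of pattern prefixes that match a suffix of the scanned part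
--     for i, c in enumerate(seq):
--         states = [j + 1 for j in states + [0] if j < m and subseq[j] == c]
--         if m in states:
--             del seq[i + 1 - m : i + 1]
--             break
--     return seq
-- ===== Notes on version B (the rewrite author's own statement) =====
-- stated objective: alternative
-- what changed: B replaces A's nested re-comparison of the pattern at every start position by a single left-to-right pass over seq that simulates the substring-matching NFA (bitap-style): it maintains the set of active partial-match lengths and deletes the window as soon as the full length becomes active.
import Mathlib
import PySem

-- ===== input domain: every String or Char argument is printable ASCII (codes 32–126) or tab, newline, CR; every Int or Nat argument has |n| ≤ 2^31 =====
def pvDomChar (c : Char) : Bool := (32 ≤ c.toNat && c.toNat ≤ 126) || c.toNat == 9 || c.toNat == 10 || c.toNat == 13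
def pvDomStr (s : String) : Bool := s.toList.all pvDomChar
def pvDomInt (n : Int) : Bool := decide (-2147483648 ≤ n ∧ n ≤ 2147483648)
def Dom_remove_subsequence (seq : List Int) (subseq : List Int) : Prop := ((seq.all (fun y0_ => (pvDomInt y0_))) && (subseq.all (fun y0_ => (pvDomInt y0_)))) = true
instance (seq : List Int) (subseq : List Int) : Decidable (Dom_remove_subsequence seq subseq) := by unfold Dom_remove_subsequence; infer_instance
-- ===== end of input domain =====

-- B replaces A's nested per-start-position re-comparison of the pattern by a single left-to-right
-- pass that simulates the substring-matching NFA (bitap-style set of active partial-match lengths).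
-- Both A and B delete the matched slice from `seq` in place and return it; the equivalence proved
-- here is about the return value.

-- ===== PORT A =====
-- inner loop 'for j, el in enumerate(subseq): if seq[i+j] != el: j = -1; break'; second arg of the
-- state is the running j.  seq[i+j] is ported as pyGetD _ _ 0: the loop only reads in-range indices
-- (0 ≤ i ≤ len(seq)-len(subseq), j < len(subseq)), so Python never raises here and the default is inert.
def pvInnerA (seq : List Int) (i : Int) : List (Int × Int) → Int → Int
  | [], j => j
  | (j', el) :: rest, _ =>
    if PySem.List.pyGetD seq (i + j') 0 ≠ el then (-1)
    else pvInnerA seq i rest j'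

-- outer loop 'for i in range(0, len(seq)-len(subseq)+1)' with break after the del;
-- 'del seq[i:i+len(subseq)]' leaves seq[:i] ++ seq[i+len(subseq):].
def pvOuterA (seq subseq : List Int) : List Int → List Int
  | [] => seq
  | i :: is =>
    let j := pvInnerA seq i (PySem.List.enumerate subseq 0) (-1)
    if j = (subseq.length : Int) - 1 then
      PySem.List.slice seq none (some i) ++
        PySem.List.slice seq (some (i + (subseq.length : Int))) none
    else pvOuterA seq subseq is

def remove_subsequence (seq : List Int) (subseq : List Int) : List Int :=
  pvOuterA seq subseq
    (PySem.List.pyRange 0 ((seq.length : Int) - (subseq.length : Int) + 1) 1)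

-- ===== PORT B =====
-- '[j + 1 for j in states + [0] if j < m and subseq[j] == c]'; the active lengths j are kept as
-- Nat (they are list lengths, 0 ≤ j ≤ m in Python too).  subseq[j] is read only when j < m
-- (Python's 'and' short-circuits), so getD's default is inert.
def pvStatesB (sub : List Int) (m : Nat) (c : Int) (states : List Nat) : List Nat :=
  ((states ++ [0]).filter (fun j => decide (j < m) && decide (sub.getD j 0 = c))).map (· + 1)

-- 'for i, c in enumerate(seq): … if m in states: del seq[i+1-m:i+1]; break'; at the deletion
-- m ≤ i + 1, so the slice bounds are the in-range non-negative i+1-m and i+1: take/drop.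
def pvLoopB (seq sub : List Int) (m : Nat) : List Int → Nat → List Nat → List Int
  | [], _, _ => seq
  | c :: rest, i, states =>
    let s' := pvStatesB sub m c states
    if m ∈ s' then seq.take (i + 1 - m) ++ seq.drop (i + 1)
    else pvLoopB seq sub m rest (i + 1) s'

def remove_subsequence_alt (seq : List Int) (subseq : List Int) : List Int :=
  pvLoopB seq subseq subseq.length seq 0 []

-- ===== PRECONDITION & SPEC =====
def Spec_remove_subsequence (seq : List Int) (subseq : List Int) (out : List Int) : Prop := out = remove_subsequence_alt seq subseq
instance (seq : List Int) (subseq : List Int) (out : List Int) : Decidable (Spec_remove_subsequence seq subseq out) := by unfold Spec_remove_subsequence; infer_instance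

-- ===== CLAIM (what is proved, stated in full; the proofs are below) =====
def Claim_equal_remove_subsequence : Prop := ∀ (seq : List Int) (subseq : List Int), Dom_remove_subsequence seq subseq → Spec_remove_subsequence seq subseq (remove_subsequence seq subseq)

-- ===== LEMMAS AND PROOFS =====

-- reference: index of the first window of seq equal to sub (none if no window matches).
def pvFM (sub : List Int) : List Int → Option Nat
  | [] => if ([] : List Int).take sub.length = sub then some 0 else none
  | x :: t => if (x :: t).take sub.length = sub then some 0 else (pvFM sub t).map (· + 1)

def pvRef (seq sub : List Int) : List Int :=
  match pvFM sub seq with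
  | none => seq
  | some k => seq.take k ++ seq.drop (k + sub.length)

lemma pvFM_nil_left (xs : List Int) : pvFM [] xs = some 0 := by
  cases xs <;> simp [pvFM]

lemma pvFM_none_of_short (sub xs : List Int) (h : xs.length < sub.length) :
    pvFM sub xs = none := by
  induction xs with
  | nil =>
    cases sub with
    | nil => simp at h
    | cons y ys => simp [pvFM]
  | cons x t ih =>
    simp only [pvFM]
    rw [if_neg, ih (by simp at h ⊢; omega), Option.map_none]
    intro hc
    have := congrArg List.length hc
    simp at this h
    omega

lemma innerA_match (seq sub : List Int) (a : Nat) :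
    ∀ (s : Nat) (jp : Int),
      (seq.drop (a + s)).take sub.length = sub →
      a + s + sub.length ≤ seq.length →
      pvInnerA seq (a : Int) (PySem.List.enumerate sub (s : Int)) jp =
        if sub = [] then jp else (s : Int) + sub.length - 1 := by
  induction sub with
  | nil => intro s jp _ _; simp [PySem.List.enumerate, pvInnerA]
  | cons el rest ih =>
    intro s jp hm hlen
    have hlt : a + s < seq.length := by simp only [List.length_cons] at hlen; omega
    rw [List.drop_eq_getElem_cons hlt, List.length_cons, List.take_succ_cons] at hm
    obtain ⟨h1, h2⟩ := List.cons_eq_cons.mp hm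
    rw [PySem.List.enumerate_cons]
    simp only [pvInnerA]
    have hg : PySem.List.pyGetD seq ((a : Int) + (s : Int)) 0 = el := by
      rw [← Nat.cast_add, PySem.List.pyGetD_natCast]
      simp [List.getD, hlt, h1]
    rw [if_neg (by simp [hg])]
    have heq : ((s : Int) + 1) = ((s + 1 : Nat) : Int) := by push_cast; ring
    rw [heq, ih (s + 1) (s : Int)
      (by rw [show a + (s + 1) = a + s + 1 by ring]; exact h2)
      (by simp only [List.length_cons] at hlen; omega)]
    cases rest with
    | nil => simp
    | cons y ys =>
      rw [if_neg (List.cons_ne_nil _ _), if_neg (List.cons_ne_nil _ _)]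
      simp only [List.length_cons]; push_cast; ring

lemma innerA_mismatch (seq sub : List Int) (a : Nat) :
    ∀ (s : Nat) (jp : Int),
      (seq.drop (a + s)).take sub.length ≠ sub →
      a + s + sub.length ≤ seq.length →
      pvInnerA seq (a : Int) (PySem.List.enumerate sub (s : Int)) jp = -1 := by
  induction sub with
  | nil => intro s jp hm _; simp at hm
  | cons el rest ih =>
    intro s jp hm hlen
    have hlt : a + s < seq.length := by simp only [List.length_cons] at hlen; omega
    rw [List.drop_eq_getElem_cons hlt, List.length_cons, List.take_succ_cons] at hm
    rw [PySem.List.enumerate_cons]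
    simp only [pvInnerA]
    have hg : PySem.List.pyGetD seq ((a : Int) + (s : Int)) 0 = seq[a + s] := by
      rw [← Nat.cast_add, PySem.List.pyGetD_natCast]
      simp [List.getD, hlt]
    by_cases hh : seq[a + s] = el
    · rw [if_neg (by simp [hg, hh])]
      have heq : ((s : Int) + 1) = ((s + 1 : Nat) : Int) := by push_cast; ring
      rw [heq]
      exact ih (s + 1) (s : Int)
        (by rw [show a + (s + 1) = a + s + 1 by ring]
            intro hc; exact hm (by rw [hh, hc])
        )
        (by simp only [List.length_cons] at hlen; omega)
    · rw [if_pos (by simp [hg, hh])]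

lemma outerA_spec (seq sub : List Int) (a : Nat) :
    pvOuterA seq sub
        (PySem.List.pyRange (a : Int) ((seq.length : Int) - (sub.length : Int) + 1) 1) =
      match pvFM sub (seq.drop a) with
      | none => seq
      | some k => seq.take (a + k) ++ seq.drop (a + k + sub.length) := by
  suffices H : ∀ (d a : Nat), seq.length - a = d →
      pvOuterA seq sub
          (PySem.List.pyRange (a : Int) ((seq.length : Int) - (sub.length : Int) + 1) 1) =
        match pvFM sub (seq.drop a) with
        | none => seq
        | some k => seq.take (a + k) ++ seq.drop (a + k + sub.length) from H _ a rfl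
  intro d
  induction d using Nat.strong_induction_on with
  | _ d ih =>
  intro a ha
  by_cases hcase : (seq.length : Int) - (sub.length : Int) + 1 ≤ (a : Int)
  · rw [PySem.List.pyRange_one_eq_nil hcase]
    by_cases hsub : sub = []
    · subst hsub
      rw [pvFM_nil_left]
      simp [pvOuterA]
    · have hlen : (seq.drop a).length < sub.length := by
        have h0 : 0 < sub.length := List.length_pos_iff.mpr hsub
        have : (seq.length : Int) + 1 ≤ (a : Int) + (sub.length : Int) := by omega
        have : seq.length + 1 ≤ a + sub.length := by exact_mod_cast this
        simp only [List.length_drop]; omega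
      rw [pvFM_none_of_short sub _ hlen]
      simp [pvOuterA]
  · push Not at hcase
    have hma : a + sub.length ≤ seq.length := by
      have : (a : Int) + (sub.length : Int) ≤ (seq.length : Int) := by omega
      exact_mod_cast this
    rw [PySem.List.pyRange_one_cons hcase]
    by_cases hm : (seq.drop a).take sub.length = sub
    · have hj := innerA_match seq sub a 0 (-1) (by simpa using hm) (by omega)
      rw [Nat.cast_zero] at hj
      by_cases hsub : sub = []
      · subst hsub
        rw [pvFM_nil_left]
        simp only [pvOuterA, hj, if_pos]
        rw [if_pos (by simp)]
        simp [PySem.List.slice_to_natCast, PySem.List.slice_from_natCast]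
      · simp only [pvOuterA, hj, if_neg hsub]
        rw [if_pos (by ring)]
        have hfm : pvFM sub (seq.drop a) = some 0 := by
          cases hda : seq.drop a with
          | nil => rw [hda] at hm; simp at hm; exact absurd hm hsub
          | cons x t => rw [hda] at hm; simp only [pvFM, hm, if_pos]
        rw [hfm]
        have hc : (a : Int) + (sub.length : Int) = ((a + sub.length : Nat) : Int) := by
          push_cast; ring
        rw [hc, PySem.List.slice_to_natCast, PySem.List.slice_from_natCast]
        simp
    · have hsub : sub ≠ [] := fun h => hm (by simp [h])
      have hj := innerA_mismatch seq sub a 0 (-1) (by simpa using hm) (by omega)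
      rw [Nat.cast_zero] at hj
      have hne : (-1 : Int) ≠ (sub.length : Int) - 1 := by
        have h0 : 0 < sub.length := List.length_pos_iff.mpr hsub
        omega
      simp only [pvOuterA, hj, if_neg hne]
      have haN : a < seq.length := by
        have h0 : 0 < sub.length := List.length_pos_iff.mpr hsub
        omega
      have h1 : ((a : Int) + 1) = ((a + 1 : Nat) : Int) := by push_cast; ring
      rw [h1, ih (seq.length - (a + 1)) (by omega) (a + 1) rfl]
      have hda : seq.drop a = seq[a] :: seq.drop (a + 1) := List.drop_eq_getElem_cons haN
      rw [hda]
      conv_rhs => rw [show pvFM sub (seq[a] :: seq.drop (a + 1)) =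
        (pvFM sub (seq.drop (a + 1))).map (· + 1) by
          simp only [pvFM]; rw [if_neg (by rw [← hda]; exact hm)]]
      cases pvFM sub (seq.drop (a + 1)) with
      | none => rfl
      | some k' =>
        simp only [Option.map_some]
        rw [show a + 1 + k' = a + (k' + 1) by ring,
            show a + (k' + 1) + sub.length = a + 1 + k' + sub.length by ring]

-- ----- B side -----

lemma pvFM_eq_none (sub xs : List Int) (h : ∀ k, (xs.drop k).take sub.length ≠ sub) :
    pvFM sub xs = none := by
  induction xs with
  | nil => simp only [pvFM]; rw [if_neg (by simpa using h 0)]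
  | cons x t ih =>
    simp only [pvFM]
    rw [if_neg (by simpa using h 0), ih (fun k => by simpa using h (k + 1)), Option.map_none]

lemma pvFM_eq_some (sub xs : List Int) (k : Nat)
    (hmatch : (xs.drop k).take sub.length = sub)
    (hmin : ∀ k', k' < k → (xs.drop k').take sub.length ≠ sub) :
    pvFM sub xs = some k := by
  induction xs generalizing k with
  | nil =>
    cases k with
    | zero => simp only [pvFM]; rw [if_pos (by simpa using hmatch)]
    | succ k' =>
      exact absurd (by simpa using hmatch) (by simpa using hmin 0 (Nat.succ_pos _))
  | cons x t ih =>
    cases k with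
    | zero => simp only [pvFM]; rw [if_pos (by simpa using hmatch)]
    | succ k' =>
      simp only [pvFM]
      rw [if_neg (by simpa using hmin 0 (Nat.succ_pos _)),
          ih k' (by simpa using hmatch)
            (fun k'' hk => by simpa using hmin (k'' + 1) (by omega)),
          Option.map_some]

lemma mem_statesB (sub : List Int) (m : Nat) (c : Int) (states : List Nat) (j' : Nat) :
    j' ∈ pvStatesB sub m c states ↔
      ∃ j, (j ∈ states ∨ j = 0) ∧ j < m ∧ sub.getD j 0 = c ∧ j' = j + 1 := by
  simp only [pvStatesB, List.mem_map, List.mem_filter, List.mem_append, List.mem_singleton,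
    Bool.and_eq_true, decide_eq_true_eq]
  constructor
  · rintro ⟨j, ⟨hmem, hlt, hget⟩, rfl⟩
    exact ⟨j, hmem, hlt, hget, rfl⟩
  · rintro ⟨j, hmem, hlt, hget, rfl⟩
    exact ⟨j, ⟨hmem, hlt, hget⟩, rfl⟩

-- extending a window ending at i by the character seq[i]
lemma window_succ (seq sub : List Int) (i j : Nat) (hji : j ≤ i) (hi : i < seq.length)
    (hjm : j < sub.length) :
    (seq.drop (i - j)).take (j + 1) = sub.take (j + 1) ↔
      ((seq.drop (i - j)).take j = sub.take j ∧ sub.getD j 0 = seq[i]) := by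
  have hlen : j < (seq.drop (i - j)).length := by simp [List.length_drop]; omega
  have hget : (seq.drop (i - j))[j]'hlen = seq[i] := by
    rw [List.getElem_drop]
    congr 1
    omega
  rw [List.take_add_one, List.take_add_one]
  rw [List.getElem?_eq_getElem hlen, List.getElem?_eq_getElem hjm, hget]
  constructor
  · intro h
    have h1 := List.append_inj h (by
      simp [List.length_take, List.length_drop]
      omega)
    have h2 : seq[i] = sub[j] := by simpa using h1.2
    exact ⟨h1.1, by rw [List.getD_eq_getElem _ _ hjm, h2]⟩
  · rintro ⟨h1, h2⟩
    rw [List.getD_eq_getElem _ _ hjm] at h2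
    rw [h1, h2]

lemma loopB_zero (seq sub : List Int) :
    ∀ (rest : List Int) (i : Nat) (states : List Nat),
      pvLoopB seq sub 0 rest i states = seq := by
  intro rest
  induction rest with
  | nil => intro i states; rfl
  | cons c r ih =>
    intro i states
    rw [pvLoopB]
    rw [if_neg]
    · exact ih _ _
    · intro hmem
      obtain ⟨j, -, -, -, hj⟩ := (mem_statesB sub 0 c states 0).mp hmem
      omega

lemma loopB_main (seq sub : List Int) (hm : 0 < sub.length) :
    ∀ (rest : List Int) (i : Nat) (states : List Nat),
      rest = seq.drop i → i ≤ seq.length →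
      (∀ j, j ∈ states ↔
        1 ≤ j ∧ j ≤ sub.length ∧ j ≤ i ∧ (seq.drop (i - j)).take j = sub.take j) →
      (∀ k, k + sub.length ≤ i → (seq.drop k).take sub.length ≠ sub) →
      pvLoopB seq sub sub.length rest i states = pvRef seq sub := by
  intro rest
  induction rest with
  | nil =>
    intro i states hrest hi _ hnm
    have hil : seq.length ≤ i := by
      have := congrArg List.length hrest
      simp [List.length_drop] at this
      omega
    rw [pvLoopB, pvRef, pvFM_eq_none]
    intro k
    by_cases hk : k + sub.length ≤ i
    · exact hnm k hk
    · intro hc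
      have := congrArg List.length hc
      simp only [List.length_take, List.length_drop] at this
      omega
  | cons c r ih =>
    intro i states hrest hi hst hnm
    have hilt : i < seq.length := by
      by_contra h
      rw [List.drop_eq_nil_of_le (by omega)] at hrest
      exact List.cons_ne_nil _ _ hrest
    have hc : c = seq[i] ∧ r = seq.drop (i + 1) := by
      rw [List.drop_eq_getElem_cons hilt] at hrest
      exact ⟨(List.cons_eq_cons.mp hrest).1, (List.cons_eq_cons.mp hrest).2⟩
    obtain ⟨hcv, hrv⟩ := hc
    have hst' : ∀ j', j' ∈ pvStatesB sub sub.length c states ↔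
        1 ≤ j' ∧ j' ≤ sub.length ∧ j' ≤ i + 1 ∧
          (seq.drop (i + 1 - j')).take j' = sub.take j' := by
      intro j'
      rw [mem_statesB]
      constructor
      · rintro ⟨j, hmem, hlt, hget, rfl⟩
        have hwin : (seq.drop (i - j)).take j = sub.take j ∧ j ≤ i := by
          rcases hmem with hmem | rfl
          · obtain ⟨-, -, hji, hw⟩ := (hst j).mp hmem
            exact ⟨hw, hji⟩
          · simp
        refine ⟨by omega, by omega, by omega, ?_⟩
        have := (window_succ seq sub i j hwin.2 hilt hlt).mpr ⟨hwin.1, by rw [hget, hcv]⟩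
        rwa [show i + 1 - (j + 1) = i - j by omega]
      · rintro ⟨h1, h2, h3, h4⟩
        refine ⟨j' - 1, ?_, by omega, ?_, by omega⟩
        · rw [show i + 1 - j' = i - (j' - 1) by omega] at h4
          have hw := (window_succ seq sub i (j' - 1) (by omega) hilt (by omega)).mp
            (by rw [show j' - 1 + 1 = j' by omega]; exact h4)
          by_cases hz : j' - 1 = 0
          · right; exact hz
          · left
            exact (hst (j' - 1)).mpr ⟨by omega, by omega, by omega, hw.1⟩
        · rw [show i + 1 - j' = i - (j' - 1) by omega] at h4
          have hw := (window_succ seq sub i (j' - 1) (by omega) hilt (by omega)).mp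
            (by rw [show j' - 1 + 1 = j' by omega]; exact h4)
          rw [hw.2, hcv]
    rw [pvLoopB]
    by_cases hmem : sub.length ∈ pvStatesB sub sub.length c states
    · rw [if_pos hmem]
      obtain ⟨-, -, h3, h4⟩ := (hst' sub.length).mp hmem
      rw [List.take_length] at h4
      have hfm := pvFM_eq_some sub seq (i + 1 - sub.length) h4
        (fun k' hk' => hnm k' (by omega))
      simp only [pvRef, hfm]
      rw [show i + 1 - sub.length + sub.length = i + 1 by omega]
    · rw [if_neg hmem]
      refine ih (i + 1) _ hrv (by omega) hst' ?_
      intro k hk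
      by_cases hki : k + sub.length ≤ i
      · exact hnm k hki
      · have hkv : k = i + 1 - sub.length := by omega
        intro hcon
        apply hmem
        refine (hst' sub.length).mpr ⟨by omega, le_rfl, by omega, ?_⟩
        rw [List.take_length, show i + 1 - sub.length = k from hkv.symm]
        exact hcon

lemma A_eq_ref (seq sub : List Int) : remove_subsequence seq sub = pvRef seq sub := by
  have h := outerA_spec seq sub 0
  rw [Nat.cast_zero] at h
  rw [remove_subsequence, h, pvRef]
  rcases hfm : pvFM sub seq with _ | k <;> simp [hfm]

lemma B_eq_ref (seq sub : List Int) : remove_subsequence_alt seq sub = pvRef seq sub := by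
  rcases Nat.eq_zero_or_pos sub.length with h0 | hpos
  · have hsub : sub = [] := List.length_eq_zero_iff.mp h0
    subst hsub
    rw [remove_subsequence_alt]
    simp only [List.length_nil]
    rw [loopB_zero, pvRef, pvFM_nil_left]
    simp
  · rw [remove_subsequence_alt]
    exact loopB_main seq sub hpos seq 0 [] rfl (by omega)
      (by intro j; simp; omega)
      (by intro k hk; omega)

-- ===== VERDICT (by name: the statement is the Claim_ definition above) =====
theorem remove_subsequence_spec : Claim_equal_remove_subsequence := by
  intro seq sub _
  unfold Spec_remove_subsequence
  rw [A_eq_ref, B_eq_ref]
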